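-- pv_equiv track=rewrite | github.com/SumihisaYutani/UpScaleAppProject | executable/core/session_manager.py | _get_current_step
-- ===== SOURCE A (Python) =====
-- from typing import Dict, List, Optional, Any, Tuple
--
-- def _get_current_step(steps: Dict[str, Any]) -> str:
--     """Determine current processing step"""
--     step_order = ['validate', 'extract', 'upscale', 'combine']
--
--     for step_name in reversed(step_order):
--         step_status = steps.get(step_name, {}).get('status', 'pending')
--         if step_status == 'in_progress':
--             return step_name
--         elif step_status == 'completed':
--             # Return next step if available
--             next_index = step_order.index(step_name) + 1
--             if next_index < len(step_order):
--                 return step_order[next_index]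
--             else:
--                 return 'completed'
--
--     return 'validate'  # Default starting step
-- ===== SOURCE B (Python) =====
-- def _get_current_step(steps):
--     """Determine current processing step"""
--     order = ['validate', 'extract', 'upscale', 'combine']
--     # rank 2*i+1 = step i in progress, 2*i+2 = step i completed; the most
--     # advanced mark wins, and the table maps each rank to the current step.
--     result_table = ['validate', 'validate', 'extract', 'extract',
--                     'upscale', 'upscale', 'combine', 'combine', 'completed']
--     rank = 0
--     for i, name in enumerate(order):
--         status = steps.get(name, {}).get('status', 'pending')
--         if status == 'in_progress':
--             rank = max(rank, 2 * i + 1)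
--         elif status == 'completed':
--             rank = max(rank, 2 * i + 2)
--     return result_table[rank]
-- ===== Notes on version B (the rewrite author's own statement) =====
-- stated objective: alternative
-- what changed: A scans step_order in reverse and early-returns per-status with an index computation; B scores every step numerically (in_progress=2i+1, completed=2i+2), takes the maximum rank, and returns a single lookup in a precomputed 9-entry result table.
import Mathlib
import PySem

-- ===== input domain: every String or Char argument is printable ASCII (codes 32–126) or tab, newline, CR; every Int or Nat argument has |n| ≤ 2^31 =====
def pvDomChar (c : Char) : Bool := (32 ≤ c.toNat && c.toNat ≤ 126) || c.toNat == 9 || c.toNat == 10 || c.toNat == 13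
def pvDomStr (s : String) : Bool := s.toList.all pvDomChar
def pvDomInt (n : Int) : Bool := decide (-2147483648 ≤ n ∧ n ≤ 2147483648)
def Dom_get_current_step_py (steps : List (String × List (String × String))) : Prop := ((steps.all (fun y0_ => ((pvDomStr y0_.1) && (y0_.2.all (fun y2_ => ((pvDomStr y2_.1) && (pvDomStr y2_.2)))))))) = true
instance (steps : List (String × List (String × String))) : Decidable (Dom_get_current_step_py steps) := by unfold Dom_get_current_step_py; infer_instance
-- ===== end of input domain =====

-- B replaces A's reverse scan with early returns by a numeric scoring pass (max of
-- per-step ranks) followed by a single lookup in a precomputed result table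
-- (objective: alternative algorithm, same cost).

-- ===== PORT A =====
def stepOrderA : List String := ["validate", "extract", "upscale", "combine"]

-- the 'for step_name in reversed(step_order)' loop with its two early returns
def getCurLoopA (steps : List (String × List (String × String))) : List String → String
  | [] => "validate"  -- falls off the loop: default starting step
  | name :: rest =>
    let stepStatus :=
      PySem.Dict.getD (PySem.Dict.mk ((PySem.Dict.mk steps).getD name [])) "status" "pending"
    if stepStatus = "in_progress" then name
    else if stepStatus = "completed" then
      -- step_order.index(step_name) always succeeds here (name ∈ step_order), so getD 0 is exact
      let nextIndex := (PySem.List.index? stepOrderA name).getD 0 + 1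
      if nextIndex < (stepOrderA.length : Int) then
        (PySem.List.pyGet? stepOrderA nextIndex).getD ""  -- index is in range here, so getD "" is exact
      else "completed"
    else getCurLoopA steps rest

def get_current_step_py (steps : List (String × List (String × String))) : String :=
  getCurLoopA steps stepOrderA.reverse

-- ===== PORT B =====
def resultTableB : List String :=
  ["validate", "validate", "extract", "extract",
   "upscale", "upscale", "combine", "combine", "completed"]

def get_current_step_py_alt (steps : List (String × List (String × String))) : String :=
  let order : List String := ["validate", "extract", "upscale", "combine"]
  let rank : Int := (PySem.List.enumerate order).foldl (fun r p =>
    let status := PySem.Dict.getD (PySem.Dict.mk ((PySem.Dict.mk steps).getD p.2 [])) "status" "pending"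
    if status = "in_progress" then max r (2 * p.1 + 1)
    else if status = "completed" then max r (2 * p.1 + 2)
    else r) 0
  (PySem.List.pyGet? resultTableB rank).getD ""  -- 0 ≤ rank ≤ 8 always, so getD "" is exact

-- ===== PRECONDITION & SPEC =====
def Spec_get_current_step_py (steps : List (String × List (String × String))) (out : String) : Prop := out = get_current_step_py_alt steps
instance (steps : List (String × List (String × String))) (out : String) : Decidable (Spec_get_current_step_py steps out) := by unfold Spec_get_current_step_py; infer_instance

-- ===== CLAIM (what is proved, stated in full; the proofs are below) =====
def Claim_equal_get_current_step_py : Prop := ∀ (steps : List (String × List (String × String))), Dom_get_current_step_py steps → Spec_get_current_step_py steps (get_current_step_py steps)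

-- ===== LEMMAS AND PROOFS =====

-- both programs as functions of the four fetched status strings
set_option maxHeartbeats 2000000 in
theorem key_get_current_step (steps : List (String × List (String × String))) :
    get_current_step_py steps = get_current_step_py_alt steps := by
  unfold get_current_step_py get_current_step_py_alt
  dsimp only
  rw [show stepOrderA.reverse = ["combine", "upscale", "extract", "validate"] from rfl]
  rw [show PySem.List.enumerate ["validate", "extract", "upscale", "combine"] =
        [((0 : Int), "validate"), (1, "extract"), (2, "upscale"), (3, "combine")] from rfl]
  simp only [getCurLoopA, List.foldl]
  generalize (PySem.Dict.getD (PySem.Dict.mk ((PySem.Dict.mk steps).getD "validate" [])) "status" "pending") = a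
  generalize (PySem.Dict.getD (PySem.Dict.mk ((PySem.Dict.mk steps).getD "extract" [])) "status" "pending") = b
  generalize (PySem.Dict.getD (PySem.Dict.mk ((PySem.Dict.mk steps).getD "upscale" [])) "status" "pending") = c
  generalize (PySem.Dict.getD (PySem.Dict.mk ((PySem.Dict.mk steps).getD "combine" [])) "status" "pending") = d
  by_cases h1 : d = "in_progress" <;> by_cases h2 : d = "completed" <;>
  by_cases h3 : c = "in_progress" <;> by_cases h4 : c = "completed" <;>
  by_cases h5 : b = "in_progress" <;> by_cases h6 : b = "completed" <;>
  by_cases h7 : a = "in_progress" <;> by_cases h8 : a = "completed" <;>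
  simp_all [PySem.List.pyGet?] <;> decide

-- ===== VERDICT (by name: the statement is the Claim_ definition above) =====
theorem get_current_step_py_spec : Claim_equal_get_current_step_py := by
  intro steps _
  exact key_get_current_step steps
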